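-- pv_equiv track=rewrite | github.com/jm1261/Fantasy-F1-League | backup_src/reports.py | create_grid_dict
-- ===== SOURCE A (Python) =====
-- def create_grid_dict(table_data):
--     '''
--     Create starting grid dictionary.
--     Args:
--         table_data: <array> list of table entries
--     Returns:
--         grid_dict: <dictionary> starting grid dictionary
--     '''
--     grid_dict = {}
--     keys = ['Pos', 'Num', 'Name', 'Surname', 'Abbrev', 'Car', 'Time']
--     for index, line in enumerate(table_data[1:]):
--         line_elements = line.split('\n')
--         if index == 0:
--             pass
--         else:
--             none_blank_elements = [
--                 element
--                 for element in line_elements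
--                 if element != '']
--             for i, element in enumerate(none_blank_elements):
--                 if keys[i] in grid_dict.keys():
--                     grid_dict[keys[i]].append(element)
--                 else:
--                     grid_dict.update({keys[i]: [element]})
--     return grid_dict
-- ===== SOURCE B (Python) =====
-- def create_grid_dict(table_data):
--     '''Column-major rebuild: materialize the non-blank rows of table_data[2:], then emit one dict entry per column index.'''
--     keys = ['Pos', 'Num', 'Name', 'Surname', 'Abbrev', 'Car', 'Time']
--     rows = [[e for e in line.split('\n') if e != ''] for line in table_data[2:]]
--     width = max(map(len, rows), default=0)
--     return {keys[i]: [r[i] for r in rows if len(r) > i] for i in range(width)}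
-- ===== Notes on version B (the rewrite author's own statement) =====
-- stated objective: alternative
-- what changed: B replaces A's row-major streaming into an incrementally grown dict by materializing the non-blank rows of table_data[2:] and then building the dict column-major, one comprehension per column index.
import Mathlib
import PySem

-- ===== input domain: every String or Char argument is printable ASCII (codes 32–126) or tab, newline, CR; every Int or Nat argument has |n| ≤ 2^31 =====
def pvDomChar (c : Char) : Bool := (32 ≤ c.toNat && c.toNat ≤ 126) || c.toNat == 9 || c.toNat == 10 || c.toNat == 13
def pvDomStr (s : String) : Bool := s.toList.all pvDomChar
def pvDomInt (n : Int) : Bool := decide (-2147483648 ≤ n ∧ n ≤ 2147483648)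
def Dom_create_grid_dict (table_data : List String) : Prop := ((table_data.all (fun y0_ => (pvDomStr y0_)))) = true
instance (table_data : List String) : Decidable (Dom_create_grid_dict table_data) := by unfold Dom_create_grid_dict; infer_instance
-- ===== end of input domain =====

-- B rebuilds the grid column-major from the materialized rows instead of A's row-major dict accumulation ('alternative'); return-value equivalence only.

-- ===== PORT A =====
def create_grid_dict (table_data : List String) : List (String × List String) :=
  let keys : List String := ["Pos", "Num", "Name", "Surname", "Abbrev", "Car", "Time"]
  ((PySem.List.enumerate (PySem.List.slice table_data (some 1) none)).foldl
    (fun grid p =>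
      if p.1 == 0 then grid   -- 'if index == 0: pass'
      else
        -- line.split('\n'); sep ≠ "" so split? is always some
        let line_elements := (PySem.Str.split? p.2 "\n").getD []
        let none_blank_elements := line_elements.filter (fun e => e ≠ "")
        (PySem.List.enumerate none_blank_elements).foldl
          (fun grid q =>
            -- keys[i]: Python raises IndexError for i ≥ 7 (excluded by Pre_)
            let k := PySem.List.pyGetD keys q.1 ""
            if grid.contains k then grid.modify k [] (fun v => v ++ [q.2])
            else grid.insert k [q.2]) grid)
    PySem.Dict.empty).items

-- ===== PORT B =====
def create_grid_dict_alt (table_data : List String) : List (String × List String) :=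
  let keys : List String := ["Pos", "Num", "Name", "Surname", "Abbrev", "Car", "Time"]
  let rows := (PySem.List.slice table_data (some 2) none).map
    (fun line => ((PySem.Str.split? line "\n").getD []).filter (fun e => e ≠ ""))
  let width := PySem.List.maxD (rows.map (fun r => r.length)) (fun x => x) 0
  (PySem.List.pyRange 0 (width : Int)).map
    (fun i => (PySem.List.pyGetD keys i "",
      (rows.filter (fun r => decide (i < (r.length : Int)))).map
        (fun r => PySem.List.pyGetD r i "")))

-- ===== PRECONDITION & SPEC =====
-- Pre_ excludes exactly the inputs where A raises IndexError: a data line (after the two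
-- skipped header lines) with more than 7 non-blank '\n'-separated elements, so keys[i] is out of range.
def Pre_create_grid_dict (table_data : List String) : Prop :=
  ∀ line ∈ table_data.drop 2,
    (((PySem.Str.split? line "\n").getD []).filter (fun e => e ≠ "")).length ≤ 7

instance (table_data : List String) : Decidable (Pre_create_grid_dict table_data) := by
  unfold Pre_create_grid_dict; infer_instance

def pvWitness_create_grid_dict : List String :=
  ["header", "colnames", "1\n44\nLewis\nHamilton\nHAM\nMercedes\n1:02.3", "2\n33\nMax"]

def Spec_create_grid_dict (table_data : List String) (out : List (String × List String)) : Prop :=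
  out = create_grid_dict_alt table_data
instance (table_data : List String) (out : List (String × List String)) : Decidable (Spec_create_grid_dict table_data out) := by
  unfold Spec_create_grid_dict; infer_instance

-- ===== CLAIM (what is proved, stated in full; the proofs are below) =====
def Claim_equal_create_grid_dict : Prop := ∀ (table_data : List String), Dom_create_grid_dict table_data → Pre_create_grid_dict table_data → Spec_create_grid_dict table_data (create_grid_dict table_data)

-- ===== LEMMAS AND PROOFS =====

-- proof-side abbreviations
def pvNB (line : String) : List String :=
  ((PySem.Str.split? line "\n").getD []).filter (fun e => e ≠ "")

def pvK (i : Int) : String :=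
  PySem.List.pyGetD ["Pos", "Num", "Name", "Surname", "Abbrev", "Car", "Time"] i ""

-- the flattened (key, element) stream A feeds into its dict
def pvL (rows : List (List String)) : List (String × String) :=
  rows.flatMap (fun row => (PySem.List.enumerate row).map (fun q => (pvK q.1, q.2)))

-- A's dict-updating step, normalized: both branches are one 'modify'
theorem pv_step_modify (d : PySem.Dict String (List String)) (k : String) (v : String) :
    (if d.contains k then d.modify k [] (fun w => w ++ [v]) else d.insert k [v])
      = d.modify k [] (fun w => w ++ [v]) := by
  by_cases h : d.contains k = true
  · simp [h]
  · simp only [Bool.not_eq_true] at h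
    simp only [h, Bool.false_eq_true, if_false]
    simp [PySem.Dict.modify, PySem.Dict.getD_of_not_contains _ _ h]

-- skipping the index-0 entry of an enumeration started at s ≥ 1 skips nothing
theorem pv_skip0 {D : Type} (g : D → String → D) (xs : List String) (s : Int) (hs : 1 ≤ s) (d : D) :
    (PySem.List.enumerate xs s).foldl (fun d p => if p.1 == 0 then d else g d p.2) d
      = xs.foldl g d := by
  induction xs generalizing s d with
  | nil => rfl
  | cons x t ih =>
      rw [PySem.List.enumerate_cons]
      simp only [List.foldl_cons]
      rw [if_neg (by simp; omega)]
      exact ih (s + 1) (by omega) _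

-- A's whole computation, as one modify-fold over the flattened stream of (td.drop 2).map pvNB
theorem pv_A_as_stream (td : List String) :
    create_grid_dict td
      = ((pvL ((td.drop 2).map pvNB)).foldl
          (fun d p => d.modify p.1 [] (fun w => w ++ [p.2])) PySem.Dict.empty).items := by
  have hcong : ∀ (rows : List (List String)) (d : PySem.Dict String (List String)),
      rows.foldl (fun d row => (PySem.List.enumerate row).foldl
        (fun grid q =>
          if grid.contains (pvK q.1) then grid.modify (pvK q.1) [] (fun v => v ++ [q.2])
          else grid.insert (pvK q.1) [q.2]) d) d
      = (pvL rows).foldl (fun d p => d.modify p.1 [] (fun w => w ++ [p.2])) d := by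
    intro rows d
    rw [pvL, List.foldl_flatMap]
    refine PySem.List.foldl_congr_mem _ _ _ _ ?_
    intro acc row _
    rw [List.foldl_map]
    refine PySem.List.foldl_congr_mem _ _ _ _ ?_
    intro acc q _
    exact pv_step_modify acc (pvK q.1) q.2
  cases td with
  | nil => rw [← hcong]; rfl
  | cons x t =>
      unfold create_grid_dict
      rw [PySem.List.slice_from_one]
      cases t with
      | nil => rw [← hcong]; rfl
      | cons y u =>
          simp only [List.tail_cons, List.drop_succ_cons, List.drop_zero]
          rw [PySem.List.enumerate_cons, List.foldl_cons]
          rw [if_pos (by simp)]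
          simp only [zero_add]
          rw [pv_skip0 (fun grid line =>
              (PySem.List.enumerate (((PySem.Str.split? line "\n").getD []).filter (fun e => e ≠ ""))).foldl
                (fun grid q =>
                  if grid.contains (PySem.List.pyGetD ["Pos", "Num", "Name", "Surname", "Abbrev", "Car", "Time"] q.1 "") then
                    grid.modify (PySem.List.pyGetD ["Pos", "Num", "Name", "Surname", "Abbrev", "Car", "Time"] q.1 "") [] (fun v => v ++ [q.2])
                  else grid.insert (PySem.List.pyGetD ["Pos", "Num", "Name", "Surname", "Abbrev", "Car", "Time"] q.1 "") [q.2]) grid)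
            u 1 (by omega) PySem.Dict.empty, ← hcong]
          rw [List.foldl_map]
          rfl

-- key stream of one row
theorem pv_map_fst_row (row : List String) :
    ((PySem.List.enumerate row).map (fun q => (pvK q.1, q.2))).map (fun p => p.1)
      = (PySem.List.pyRange 0 (row.length : Int)).map pvK := by
  rw [List.map_map]
  have : ((fun p => p.1) ∘ (fun q : Int × String => (pvK q.1, q.2))) = pvK ∘ (fun q : Int × String => q.1) := rfl
  rw [this, ← List.map_map, PySem.List.map_fst_enumerate]
  norm_num

-- one update step of the key-set
theorem pv_set_step (m ℓ : Nat) (hm : m ≤ 7) (hl : ℓ ≤ 7) :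
    PySem.Set.update ((PySem.List.pyRange 0 (m : Int)).map pvK)
        ((PySem.List.pyRange 0 (ℓ : Int)).map pvK)
      = (PySem.List.pyRange 0 ((max m ℓ : Nat) : Int)).map pvK := by
  interval_cases m <;> interval_cases ℓ <;> decide

-- accumulated key-set over all rows
theorem pv_set_flat (rows : List (List String)) (m : Nat) (hm : m ≤ 7)
    (hr : ∀ r ∈ rows, r.length ≤ 7) :
    PySem.Set.update ((PySem.List.pyRange 0 (m : Int)).map pvK)
        (rows.flatMap (fun row => (PySem.List.pyRange 0 (row.length : Int)).map pvK))
      = (PySem.List.pyRange 0 (((rows.map List.length).foldl max m : Nat) : Int)).map pvK := by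
  induction rows generalizing m with
  | nil => rfl
  | cons r t ih =>
      have hr7 : r.length ≤ 7 := hr r (by simp)
      have hupd : ∀ (s : PySem.Set String) (xs ys : List String),
          PySem.Set.update s (xs ++ ys) = PySem.Set.update (PySem.Set.update s xs) ys := by
        intro s xs ys; simp [PySem.Set.update, List.foldl_append]
      simp only [List.flatMap_cons, List.map_cons, List.foldl_cons]
      rw [hupd, pv_set_step m r.length hm hr7]
      exact ih (max m r.length) (by omega) (fun x hx => hr x (by simp [hx]))

-- (range n).filter (· == i) is [i] iff i < n
theorem pv_range_filter (n i : Nat) :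
    (List.range n).filter (fun k => k == i) = if i < n then [i] else [] := by
  induction n with
  | zero => simp
  | succ n ih =>
      rw [List.range_succ, List.filter_append, ih]
      by_cases h : i < n
      · rw [if_pos h, if_pos (by omega)]
        simp; omega
      · by_cases h2 : i = n
        · subst h2; rw [if_neg h, if_pos (by omega)]; simp
        · rw [if_neg h, if_neg (by omega)]; simp; omega

-- injectivity of pvK on 0..6  (used by pv_row_filter above)
theorem pvK_inj (i j : Int) (hi0 : 0 ≤ i) (hi : i < 7) (hj0 : 0 ≤ j) (hj : j < 7)
    (h : pvK i = pvK j) : i = j := by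
  interval_cases i <;> interval_cases j <;> simp_all [pvK, PySem.List.pyGetD]

-- the values filtered out of one row's stream at key pvK i
theorem pv_row_filter (row : List String) (i : Nat) (hi : i < 7) (hr : row.length ≤ 7) :
    ((((PySem.List.enumerate row).map (fun q => (pvK q.1, q.2))).filter
        (fun p => p.1 == pvK (i : Int))).map (fun p => p.2))
      = if (i : Int) < (row.length : Int) then [PySem.List.pyGetD row (i : Int) ""] else [] := by
  rw [PySem.List.enumerate_eq_map_pyRange row ""]
  rw [List.map_map, List.filter_map, List.map_map]
  have hlen : PySem.List.len row = ((row.length : Nat) : Int) := rfl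
  rw [hlen, PySem.List.pyRange_zero_natCast, List.filter_map]
  have hcong : ∀ k ∈ List.range row.length,
      (((fun p : String × String => p.1 == pvK (i : Int)) ∘
        (fun q : Int × String => (pvK q.1, q.2)) ∘ (fun j : Int => (j, PySem.List.pyGetD row j "")))
          ∘ (fun k : Nat => (k : Int))) k = (k == i) := by
    intro k hk
    simp only [List.mem_range] at hk
    simp only [Function.comp_apply]
    by_cases he : k = i
    · subst he; simp
    · have : pvK (k : Int) ≠ pvK (i : Int) := by
        intro hc
        have := pvK_inj (k : Int) (i : Int) (by omega) (by omega) (by omega) (by omega) hc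
        omega
      simp [this]
      omega
  rw [List.filter_congr hcong, pv_range_filter row.length i]
  by_cases h : i < row.length
  · rw [if_pos h, if_pos (by exact_mod_cast h)]; rfl
  · rw [if_neg h, if_neg (by exact_mod_cast h)]; rfl

-- a running max of casts is the cast of the running max
theorem pv_foldl_max_cast (t : List Nat) (a : Nat) :
    (t.map (fun n : Nat => (n : Int))).foldl max (a : Int) = ((t.foldl max a : Nat) : Int) := by
  induction t generalizing a with
  | nil => rfl
  | cons x u ih =>
      simp only [List.map_cons, List.foldl_cons, ← Nat.cast_max, ih]

-- max(map(len, rows), default=0) is the running maximum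
theorem pv_maxD (l : List Nat) :
    PySem.List.maxD (l.map (fun n : Nat => (n : Int))) (fun x => x) 0 = ((l.foldl max 0 : Nat) : Int) := by
  cases l with
  | nil => rfl
  | cons x t =>
      simp only [List.map_cons, PySem.List.maxD, PySem.List.max?_id_cons, Option.getD_some,
        List.foldl_cons, Nat.zero_max]
      exact pv_foldl_max_cast t x

-- the column at index iN, read off A's flattened stream
theorem pv_col (iN : Nat) (hi : iN < 7) (rows : List (List String))
    (hr : ∀ r ∈ rows, r.length ≤ 7) :
    ((pvL rows).filter (fun p => p.1 == pvK (iN : Int))).map (fun p => p.2)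
      = (rows.filter (fun r => decide ((iN : Int) < (r.length : Int)))).map
          (fun r => PySem.List.pyGetD r (iN : Int) "") := by
  induction rows with
  | nil => rfl
  | cons r t ih =>
      have h7 : r.length ≤ 7 := hr r (by simp)
      have ih' := ih (fun x hx => hr x (by simp [hx]))
      simp only [pvL, List.flatMap_cons, List.filter_append, List.map_append] at *
      rw [pv_row_filter r iN hi h7, ih']
      by_cases hc : (iN : Int) < (r.length : Int)
      · rw [if_pos hc, List.filter_cons_of_pos (by simpa using hc), List.map_cons]
        rfl
      · rw [if_neg hc, List.filter_cons_of_neg (by simpa using hc), List.nil_append]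

theorem create_grid_dict_spec : Claim_equal_create_grid_dict := by
  intro td _ hpre
  unfold Spec_create_grid_dict
  -- name the materialized rows
  have hrows7 : ∀ r ∈ (td.drop 2).map pvNB, r.length ≤ 7 := by
    intro r hr
    obtain ⟨line, hline, rfl⟩ := List.mem_map.mp hr
    exact hpre line hline
  -- A as one modify-fold over the flattened stream
  rw [pv_A_as_stream td]
  -- its items, keys and values
  have hnd : ((pvL ((td.drop 2).map pvNB)).foldl
      (fun d p => d.modify p.1 [] (fun w => w ++ [p.2])) PySem.Dict.empty).keys.Nodup :=
    PySem.Dict.nodup_keys_foldl_modify_key (pvL ((td.drop 2).map pvNB)) Prod.fst []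
      (fun _ p => fun w => w ++ [p.2]) PySem.Dict.empty (by simp)
  rw [PySem.Dict.items_eq_map_keys _ hnd []]
  have hk := PySem.Dict.keys_foldl_modify_key (pvL ((td.drop 2).map pvNB)) Prod.fst []
      (fun _ p => fun w => w ++ [p.2]) PySem.Dict.empty
  rw [hk, PySem.Dict.keys_empty]
  -- the key stream
  have hfst : (pvL ((td.drop 2).map pvNB)).map Prod.fst
      = ((td.drop 2).map pvNB).flatMap
          (fun row => (PySem.List.pyRange 0 (row.length : Int)).map pvK) := by
    rw [pvL, List.map_flatMap]
    simp only [pv_map_fst_row]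
  rw [hfst]
  rw [show PySem.Set.update ([] : PySem.Set String)
        (((td.drop 2).map pvNB).flatMap
          (fun row => (PySem.List.pyRange 0 (row.length : Int)).map pvK))
      = PySem.Set.update ((PySem.List.pyRange 0 ((0 : Nat) : Int)).map pvK)
        (((td.drop 2).map pvNB).flatMap
          (fun row => (PySem.List.pyRange 0 (row.length : Int)).map pvK)) from rfl]
  rw [pv_set_flat _ 0 (by omega) hrows7]
  -- B's side
  simp only [create_grid_dict_alt]
  rw [show PySem.List.slice td (some 2) none = td.drop 2 by
    simpa using PySem.List.slice_from_natCast td 2]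
  rw [show ((td.drop 2).map
      (fun line => ((PySem.Str.split? line "\n").getD []).filter (fun e => e ≠ ""))) =
      (td.drop 2).map pvNB from rfl]
  rw [show (((td.drop 2).map pvNB).map (fun r => ((r.length : Nat) : Int)))
      = (((td.drop 2).map pvNB).map List.length).map (fun n : Nat => (n : Int)) from by
    simp only [List.map_map]; rfl]
  rw [pv_maxD]
  -- both are maps over the same index range
  have hW7 : (((td.drop 2).map pvNB).map List.length).foldl max 0 ≤ 7 := by
    rcases PySem.List.foldl_max_mem ((((td.drop 2).map pvNB)).map List.length) 0 with h | h
    · omega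
    · obtain ⟨r, hrm, hlen⟩ := List.mem_map.mp h
      have := hrows7 r hrm
      omega
  rw [List.map_map]
  refine List.map_congr_left ?_
  intro i hi
  obtain ⟨hi0, hiW⟩ := PySem.List.mem_pyRange_one.mp hi
  have hiN : ((i.toNat : Nat) : Int) = i := Int.toNat_of_nonneg hi0
  have hi7 : i.toNat < 7 := by omega
  simp only [Function.comp_apply]
  refine Prod.ext rfl ?_
  show (((pvL ((td.drop 2).map pvNB)).foldl
      (fun d p => d.modify p.1 [] (fun w => w ++ [p.2])) PySem.Dict.empty).getD (pvK i) []) = _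
  rw [PySem.Dict.getD_foldl_modify_append, PySem.Dict.getD_empty, List.nil_append]
  rw [← hiN]
  exact pv_col i.toNat hi7 ((td.drop 2).map pvNB) hrows7
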